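-- pv_equiv track=rewrite | github.com/vedant-kokate/Project-Euler | 111.py | to_9_base
-- ===== SOURCE A (Python) =====
-- def to_9_base(n, l):
--     a = []
--     while n:
--         d = n % 9
--         a.append(d)
--         n //= 9
--     a = a[::-1]
--     if len(a) < l:
--         a = [0] * (l - len(a)) + a
--     return a
-- ===== SOURCE B (Python) =====
-- def to_9_base(n, l):
--     # count base-9 digits of n, then emit leading zeros and extract digits
--     # most-significant-first by position with a decreasing power of 9
--     k = 0
--     m = n
--     while m:
--         m //= 9
--         k += 1
--     L = max(l, k)
--     out = [0] * (L - k)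
--     p = 9 ** (k - 1) if k else 1
--     for _ in range(k):
--         out.append((n // p) % 9)
--         p //= 9
--     return out
-- ===== Notes on version B (the rewrite author's own statement) =====
-- stated objective: alternative
-- what changed: B counts the base-9 digits first, emits the leading zeros in one block, and extracts the digits most-significant-first by position with a maintained decreasing power of 9, eliminating A's accumulate-then-reverse list and its explicit padding branch.
import Mathlib
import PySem

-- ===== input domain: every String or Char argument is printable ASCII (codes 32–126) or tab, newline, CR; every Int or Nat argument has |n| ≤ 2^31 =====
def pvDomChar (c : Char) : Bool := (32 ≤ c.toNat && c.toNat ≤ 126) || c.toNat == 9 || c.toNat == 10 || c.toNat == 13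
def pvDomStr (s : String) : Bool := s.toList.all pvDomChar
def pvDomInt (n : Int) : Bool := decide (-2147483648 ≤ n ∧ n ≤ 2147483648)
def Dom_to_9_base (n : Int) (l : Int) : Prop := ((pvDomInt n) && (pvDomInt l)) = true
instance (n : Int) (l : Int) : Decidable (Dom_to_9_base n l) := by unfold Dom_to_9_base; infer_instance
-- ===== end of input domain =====

-- B builds the digit list most-significant-first by positional extraction instead of
-- A's accumulate-LSB-first/reverse/pad scheme (objective: alternative decomposition).

-- ===== PORT A =====
-- the `while n:` loop; for n < 0 Python loops forever (n //= 9 stalls at -1), so we stop there (outside Pre_)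
def pvALoop (n : Int) (acc : List Int) : List Int :=
  if 0 < n then pvALoop (PySem.Int.floordiv n 9) (acc ++ [PySem.Int.mod n 9]) else acc
termination_by n.toNat
decreasing_by
  have h9 : PySem.Int.floordiv n 9 = n / 9 := PySem.Int.floordiv_eq_ediv_of_pos (by omega)
  rw [h9]; omega

def to_9_base (n : Int) (l : Int) : List Int :=
  let a := (pvALoop n []).reverse
  if (a.length : Int) < l then List.replicate (l - (a.length : Int)).toNat 0 ++ a else a

-- ===== PORT B =====
-- the digit-count loop of Source B (same divergence caveat for n < 0, outside Pre_)
def pvCount (n : Int) : Int :=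
  if 0 < n then 1 + pvCount (PySem.Int.floordiv n 9) else 0
termination_by n.toNat
decreasing_by
  have h9 : PySem.Int.floordiv n 9 = n / 9 := PySem.Int.floordiv_eq_ediv_of_pos (by omega)
  rw [h9]; omega

-- the `for _ in range(k): out.append((n // p) % 9); p //= 9` loop of Source B
def pvBLoop (n : Int) (p : Int) (k : Nat) (out : List Int) : List Int :=
  match k with
  | 0 => out
  | Nat.succ k' =>
      pvBLoop n (PySem.Int.floordiv p 9) k' (out ++ [PySem.Int.mod (PySem.Int.floordiv n p) 9])

def to_9_base_alt (n : Int) (l : Int) : List Int :=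
  let k := pvCount n
  let L := max l k
  let out := List.replicate (L - k).toNat 0
  let p : Int := if k ≠ 0 then 9 ^ (k.toNat - 1) else 1
  pvBLoop n p k.toNat out

-- ===== PRECONDITION & SPEC =====
-- Pre_ excludes n < 0, on which Python A (and B) never return: `n //= 9` stalls at -1, so the while loop diverges.
def Pre_to_9_base (n : Int) (l : Int) : Prop := 0 ≤ n
instance (n : Int) (l : Int) : Decidable (Pre_to_9_base n l) := by unfold Pre_to_9_base; infer_instance
def pvWitness_to_9_base : Int × Int := (7, 3)

def Spec_to_9_base (n : Int) (l : Int) (out : List Int) : Prop := out = to_9_base_alt n l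
instance (n : Int) (l : Int) (out : List Int) : Decidable (Spec_to_9_base n l out) := by unfold Spec_to_9_base; infer_instance

-- ===== CLAIM (what is proved, stated in full; the proofs are below) =====
def Claim_equal_to_9_base : Prop := ∀ (n : Int) (l : Int), Dom_to_9_base n l → Pre_to_9_base n l → Spec_to_9_base n l (to_9_base n l)

-- ===== LEMMAS AND PROOFS =====

theorem pvCount_nonneg (n : Int) : 0 ≤ pvCount n := by
  rw [pvCount]
  split
  · have := pvCount_nonneg (PySem.Int.floordiv n 9)
    omega
  · omega
termination_by n.toNat
decreasing_by
  have h9 : PySem.Int.floordiv n 9 = n / 9 := PySem.Int.floordiv_eq_ediv_of_pos (by omega)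
  rw [h9]; omega

theorem pvALoop_acc (n : Int) (acc : List Int) : pvALoop n acc = acc ++ pvALoop n [] := by
  by_cases h : 0 < n
  · rw [pvALoop, if_pos h, pvALoop_acc _ (acc ++ _)]
    conv_rhs => rw [pvALoop, if_pos h, pvALoop_acc _ ([] ++ _)]
    simp
  · rw [pvALoop, if_neg h]
    conv_rhs => rw [pvALoop, if_neg h]
    simp
termination_by n.toNat
decreasing_by
  all_goals
    have h9 : PySem.Int.floordiv n 9 = n / 9 := PySem.Int.floordiv_eq_ediv_of_pos (by omega)
    rw [h9]; omega

-- main digit lemma: positional extraction over range L equals A's LSB-first digit list plus trailing zeros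
theorem pvMain (n : Int) (hn : 0 ≤ n) (L : Nat) (hL : (pvCount n).toNat ≤ L) :
    (List.range L).map (fun j => PySem.Int.mod (PySem.Int.floordiv n (9 ^ j)) 9)
      = pvALoop n [] ++ List.replicate (L - (pvCount n).toNat) 0 := by
  by_cases h : 0 < n
  · have h9 : PySem.Int.floordiv n 9 = n / 9 := PySem.Int.floordiv_eq_ediv_of_pos (by omega)
    have hn' : 0 ≤ PySem.Int.floordiv n 9 := by rw [h9]; omega
    have hc : pvCount n = 1 + pvCount (PySem.Int.floordiv n 9) := by rw [pvCount]; simp [h]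
    have hcn := pvCount_nonneg (PySem.Int.floordiv n 9)
    have hct : (pvCount n).toNat = (pvCount (PySem.Int.floordiv n 9)).toNat + 1 := by omega
    obtain ⟨L', rfl⟩ : ∃ L', L = L' + 1 := ⟨L - 1, by omega⟩
    have ih := pvMain (PySem.Int.floordiv n 9) hn' L' (by omega)
    have hA : pvALoop n [] = PySem.Int.mod n 9 :: pvALoop (PySem.Int.floordiv n 9) [] := by
      rw [pvALoop]; simp only [h, if_pos]
      rw [pvALoop_acc]; simp
    rw [List.range_succ_eq_map]
    simp only [List.map_cons, List.map_map]
    have hstep : ∀ j : Nat,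
        PySem.Int.mod (PySem.Int.floordiv n (9 ^ (j + 1))) 9
          = PySem.Int.mod (PySem.Int.floordiv (PySem.Int.floordiv n 9) (9 ^ j)) 9 := by
      intro j
      obtain ⟨m, rfl⟩ : ∃ m : Nat, n = (m : Int) := ⟨n.toNat, by omega⟩
      have e1 : (9 : Int) ^ (j + 1) = ((9 ^ (j + 1) : Nat) : Int) := by push_cast; ring
      have e2 : (9 : Int) ^ j = ((9 ^ j : Nat) : Int) := by push_cast; ring
      have e9 : (9 : Int) = ((9 : Nat) : Int) := by norm_num
      simp only [e1, e2]
      simp only [e9]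
      simp only [PySem.Int.floordiv_natCast, PySem.Int.mod_natCast]
      have hd : m / 9 ^ (j + 1) = m / 9 / 9 ^ j := by
        rw [pow_succ, mul_comm, ← Nat.div_div_eq_div_mul]
      rw [hd]
    have hzero : PySem.Int.mod (PySem.Int.floordiv n (9 ^ 0)) 9 = PySem.Int.mod n 9 := by
      have : PySem.Int.floordiv n (9 ^ 0) = n := by
        rw [pow_zero, PySem.Int.floordiv_eq_ediv_of_pos (by norm_num)]; simp
      rw [this]
    rw [hA, hct]
    simp only [hzero]
    congr 1
    calc (List.range L').map ((fun j => PySem.Int.mod (PySem.Int.floordiv n (9 ^ j)) 9) ∘ (· + 1))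
        = (List.range L').map (fun j => PySem.Int.mod (PySem.Int.floordiv (PySem.Int.floordiv n 9) (9 ^ j)) 9) := by
          apply List.map_congr_left; intro j _; exact hstep j
      _ = pvALoop (PySem.Int.floordiv n 9) [] ++ List.replicate (L' - (pvCount (PySem.Int.floordiv n 9)).toNat) 0 := ih
      _ = pvALoop (PySem.Int.floordiv n 9) [] ++ List.replicate (L' + 1 - ((pvCount (PySem.Int.floordiv n 9)).toNat + 1)) 0 := by
          congr 2; omega
  · have hn0 : n = 0 := by omega
    subst hn0
    have hc : pvCount 0 = 0 := by rw [pvCount]; simp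
    have hA : pvALoop 0 [] = [] := by rw [pvALoop]; simp
    rw [hc, hA]
    simp only [Int.toNat_zero, Nat.sub_zero, List.nil_append]
    have : ∀ j : Nat, PySem.Int.mod (PySem.Int.floordiv 0 (9 ^ j)) 9 = 0 := by
      intro j
      have : PySem.Int.floordiv 0 (9 ^ j) = 0 := by
        rw [PySem.Int.floordiv_eq_ediv_of_pos (by positivity)]; simp
      rw [this, PySem.Int.mod_eq_emod_of_pos (by norm_num)]; simp
    simp only [this]
    simp
termination_by n.toNat
decreasing_by
  have h9 : PySem.Int.floordiv n 9 = n / 9 := PySem.Int.floordiv_eq_ediv_of_pos (by omega)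
  rw [h9]; omega

theorem pvRevMap (k : Nat) (f : Nat → Int) :
    (List.range k).map (fun i => f (k - 1 - i)) = ((List.range k).map f).reverse := by
  induction k generalizing f with
  | zero => simp
  | succ k ih =>
    conv_lhs => rw [List.range_succ_eq_map]
    conv_rhs => rw [List.range_succ]
    simp only [List.map_cons, List.map_map, List.map_append, List.reverse_append,
      List.map_nil, List.reverse_cons, List.reverse_nil, List.nil_append, List.singleton_append]
    have h0 : k + 1 - 1 - 0 = k := by omega
    have h1 : (List.range k).map ((fun i => f (k + 1 - 1 - i)) ∘ Nat.succ)
        = (List.range k).map (fun i => f (k - 1 - i)) := by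
      apply List.map_congr_left; intro j _
      simp only [Function.comp]
      congr 1; omega
    rw [h0, h1, ih]

theorem pvLen (n : Int) (hn : 0 ≤ n) : (pvALoop n []).length = (pvCount n).toNat := by
  have h := pvMain n hn (pvCount n).toNat le_rfl
  simp at h
  have := congrArg List.length h
  simpa using this.symm

theorem pvBLoop_acc (n p : Int) (k : Nat) (out : List Int) :
    pvBLoop n p k out = out ++ pvBLoop n p k [] := by
  induction k generalizing p out with
  | zero => simp [pvBLoop]
  | succ k ih =>
    rw [pvBLoop]
    conv_rhs => rw [pvBLoop]
    rw [ih _ (out ++ _), ih _ ([] ++ _)]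
    simp

theorem pvBLoop_digits (n : Int) (c : Nat) :
    pvBLoop n (9 ^ (c - 1)) c []
      = (List.range c).map (fun i => PySem.Int.mod (PySem.Int.floordiv n (9 ^ (c - 1 - i))) 9) := by
  induction c with
  | zero => simp [pvBLoop]
  | succ c ih =>
    rw [pvBLoop, pvBLoop_acc]
    conv_rhs => rw [List.range_succ_eq_map]
    simp only [List.map_cons, List.map_map, Nat.sub_zero, List.nil_append, List.singleton_append]
    have hsub : c + 1 - 1 = c := by omega
    rw [hsub]
    congr 1
    have hmap : (List.range c).map ((fun i => PySem.Int.mod (PySem.Int.floordiv n (9 ^ (c - i))) 9) ∘ Nat.succ)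
        = (List.range c).map (fun i => PySem.Int.mod (PySem.Int.floordiv n (9 ^ (c - 1 - i))) 9) := by
      apply List.map_congr_left; intro j _
      simp only [Function.comp]
      have he : c - Nat.succ j = c - 1 - j := by omega
      rw [he]
    rw [hmap, ← ih]
    cases c with
    | zero => simp [pvBLoop]
    | succ c' =>
      have hp : PySem.Int.floordiv ((9 : Int) ^ (c' + 1)) 9 = 9 ^ (c' + 1 - 1) := by
        rw [PySem.Int.floordiv_eq_ediv_of_pos (by norm_num), pow_succ]
        simp
      rw [hp]

-- ===== VERDICT (by name: the statement is the Claim_ definition above) =====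
theorem to_9_base_spec : Claim_equal_to_9_base := by
  intro n l _ hn
  unfold Spec_to_9_base to_9_base to_9_base_alt
  have hcn := pvCount_nonneg n
  have hlen := pvLen n hn
  set c : Nat := (pvCount n).toNat with hc
  have hp : (if pvCount n ≠ 0 then (9 : Int) ^ ((pvCount n).toNat - 1) else 1) = 9 ^ (c - 1) := by
    split
    · rfl
    · have : c = 0 := by omega
      rw [this]; norm_num
  simp only [hp]
  rw [pvBLoop_acc, pvBLoop_digits, pvRevMap c
    (fun j => PySem.Int.mod (PySem.Int.floordiv n (9 ^ j)) 9)]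
  have hmain := pvMain n hn c le_rfl
  rw [hmain]
  have hz : c - (pvCount n).toNat = 0 := by omega
  rw [hz]
  simp only [List.replicate_zero, List.append_nil]
  by_cases hl : ((pvALoop n []).reverse.length : Int) < l
  · rw [if_pos hl]
    congr 2
    simp only [List.length_reverse] at hl ⊢
    omega
  · rw [if_neg hl]
    simp only [List.length_reverse] at hl
    have : (max l (pvCount n) - pvCount n).toNat = 0 := by omega
    rw [this]
    simp
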